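-- pv_equiv track=rewrite | github.com/prodesert22/JogosBot | Functions/blackjack.py | total_a
-- ===== SOURCE A (Python) =====
-- def total_a(total, hand):
-- 	conta = 0
-- 	for card in hand:
-- 		if card == "A":
-- 			if(hand.count("A") > 1):
-- 				conta  = hand.count("A")
-- 				break
-- 			if(total>=11):
-- 				conta+=1
-- 			else:
-- 				conta+=11
-- 	return conta
-- ===== SOURCE B (Python) =====
-- def total_a(total, hand):
--     c = hand.count("A")
--     if c == 0:
--         return 0
--     if c > 1:
--         return c
--     return 1 if total >= 11 else 11
-- ===== Notes on version B (the rewrite author's own statement) =====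
-- stated objective: simpler
-- what changed: Replaces the for-loop with break and repeated in-loop recounts by a single ace count followed by a closed-form three-way branch (0 aces -> 0, several aces -> the count, one ace -> 1 or 11 by the total>=11 boundary).
import Mathlib
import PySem

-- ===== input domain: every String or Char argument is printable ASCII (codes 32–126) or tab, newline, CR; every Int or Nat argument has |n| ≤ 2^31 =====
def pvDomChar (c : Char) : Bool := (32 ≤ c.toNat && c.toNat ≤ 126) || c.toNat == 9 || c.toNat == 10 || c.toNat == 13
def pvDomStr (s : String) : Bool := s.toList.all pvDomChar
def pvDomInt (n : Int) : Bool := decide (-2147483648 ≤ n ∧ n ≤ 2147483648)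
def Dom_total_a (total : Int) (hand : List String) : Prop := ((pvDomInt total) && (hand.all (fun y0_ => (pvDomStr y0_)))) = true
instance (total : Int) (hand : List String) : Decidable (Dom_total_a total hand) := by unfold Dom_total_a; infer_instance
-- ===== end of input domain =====

-- B replaces A's for-loop with break and in-loop recounts by one count and a closed-form branch; objective: simpler.

-- ===== PORT A =====
-- the for-loop over `hand` with accumulator `conta`; the break is modelled by returning immediately
def total_a_loop (total : Int) (full : List String) : List String → Int → Int
  | [], conta => conta
  | card :: rest, conta =>
    if card == "A" then
      if (PySem.List.count full "A" : Int) > 1 then (PySem.List.count full "A" : Int)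
      else if total ≥ 11 then total_a_loop total full rest (conta + 1)
      else total_a_loop total full rest (conta + 11)
    else total_a_loop total full rest conta

def total_a (total : Int) (hand : List String) : Int :=
  total_a_loop total hand hand 0

-- ===== PORT B =====
def total_a_alt (total : Int) (hand : List String) : Int :=
  let c : Int := (PySem.List.count hand "A" : Int)
  if c == 0 then 0
  else if c > 1 then c
  else if total ≥ 11 then 1 else 11

-- ===== PRECONDITION & SPEC =====
def Spec_total_a (total : Int) (hand : List String) (out : Int) : Prop := out = total_a_alt total hand
instance (total : Int) (hand : List String) (out : Int) : Decidable (Spec_total_a total hand out) := by unfold Spec_total_a; infer_instance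

-- ===== CLAIM (what is proved, stated in full; the proofs are below) =====
def Claim_equal_total_a : Prop := ∀ (total : Int) (hand : List String), Dom_total_a total hand → Spec_total_a total hand (total_a total hand)

-- ===== LEMMAS AND PROOFS =====

-- when the full hand holds at most one ace, the loop just adds 1 or 11 per ace of the suffix
theorem total_a_loop_le_one (total : Int) (full : List String)
    (h : PySem.List.count full "A" ≤ 1) (l : List String) (conta : Int) :
    total_a_loop total full l conta
      = conta + (l.count "A" : Int) * (if total ≥ 11 then 1 else 11) := by
  induction l generalizing conta with
  | nil => simp [total_a_loop]
  | cons card rest ih =>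
    by_cases hc : card = "A"
    · subst hc
      have hnot : ¬ ((PySem.List.count full "A" : Int) > 1) := by
        have : (PySem.List.count full "A" : Int) ≤ 1 := by exact_mod_cast h
        omega
      rw [total_a_loop, if_pos (by simp), if_neg hnot]
      by_cases ht : total ≥ 11 <;>
        simp only [ht, if_pos, ih, List.count_cons_self, ite_false] <;>
        push_cast <;> ring
    · rw [total_a_loop, if_neg (by simpa using hc), ih]
      simp [hc]

-- when the full hand holds more than one ace, hitting any ace returns the count
theorem total_a_loop_gt_one (total : Int) (full : List String)
    (h : 1 < PySem.List.count full "A") (l : List String) (conta : Int)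
    (hl : "A" ∈ l) :
    total_a_loop total full l conta = (PySem.List.count full "A" : Int) := by
  induction l generalizing conta with
  | nil => simp at hl
  | cons card rest ih =>
    by_cases hc : card = "A"
    · subst hc
      have hgt : (PySem.List.count full "A" : Int) > 1 := by exact_mod_cast h
      rw [total_a_loop, if_pos (by simp), if_pos hgt]
    · rw [total_a_loop, if_neg (by simpa using hc)]
      exact ih conta (by
        rcases List.mem_cons.mp hl with h1 | h1
        · exact absurd h1.symm hc
        · exact h1)

-- ===== VERDICT (by name: the statement is the Claim_ definition above) =====
theorem total_a_spec : Claim_equal_total_a := by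
  intro total hand _
  unfold Spec_total_a total_a total_a_alt
  rcases Nat.lt_or_ge 1 (PySem.List.count hand "A") with hgt | hle
  · have hmem : "A" ∈ hand := by
      have : 0 < List.count "A" hand := by
        have := hgt; simp [PySem.List.count] at this; omega
      exact List.count_pos_iff.mp this
    rw [total_a_loop_gt_one total hand hgt hand 0 hmem]
    have h0 : ¬ ((PySem.List.count hand "A" : Int) == 0) = true := by
      simp only [beq_iff_eq]; intro he
      have : PySem.List.count hand "A" = 0 := by exact_mod_cast he
      omega
    have hgt' : ((PySem.List.count hand "A" : Int) > 1) := by exact_mod_cast hgt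
    rw [if_neg h0, if_pos hgt']
  · rw [total_a_loop_le_one total hand hle hand 0]
    interval_cases h : (PySem.List.count hand "A")
    · have hc0 : List.count "A" hand = 0 := by simpa [PySem.List.count] using h
      simp [hc0]
    · have hc1 : List.count "A" hand = 1 := by simpa [PySem.List.count] using h
      by_cases ht : total ≥ 11 <;> simp [hc1, ht]
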